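-- pv_equiv track=rewrite | github.com/sjawhar/no-wander | app/src/models/build.py | count_layers
-- ===== SOURCE A (Python) =====
-- def count_layers(layers):
--     last_layers = {}
--     layer_count = []
--     num_layers = len(layers)
--     for i in range(num_layers):
--         layer_type = layers[i].get("type")
--         last_layer_index, last_layer_num = last_layers.get(layer_type, (None, 0))
--
--         layer_num = last_layer_num + 1
--         layer_count.append([layer_num, True])
--         if last_layer_index is not None:
--             layer_count[last_layer_index][1] = False
--
--         last_layers[layer_type] = (i, layer_num)
--
--     return layer_count
-- ===== SOURCE B (Python) =====
-- def count_layers(layers):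
--     # Pass 1: last occurrence index per layer type.
--     last_index = {}
--     for i, layer in enumerate(layers):
--         last_index[layer.get("type")] = i
--     # Pass 2: running per-type counter; is_last decided up front.
--     counts = {}
--     result = []
--     for i, layer in enumerate(layers):
--         layer_type = layer.get("type")
--         layer_num = counts.get(layer_type, 0) + 1
--         counts[layer_type] = layer_num
--         result.append([layer_num, i == last_index[layer_type]])
--     return result
-- ===== Notes on version B (the rewrite author's own statement) =====
-- stated objective: alternative
-- what changed: B replaces A's single pass that back-patches the is_last flag of the previous same-type entry with two forward passes: a first pass records each type's last index in a dict, and a second pass emits [running_count+1, i == last_index[type]] directly, never mutating earlier output entries.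
import Mathlib
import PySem

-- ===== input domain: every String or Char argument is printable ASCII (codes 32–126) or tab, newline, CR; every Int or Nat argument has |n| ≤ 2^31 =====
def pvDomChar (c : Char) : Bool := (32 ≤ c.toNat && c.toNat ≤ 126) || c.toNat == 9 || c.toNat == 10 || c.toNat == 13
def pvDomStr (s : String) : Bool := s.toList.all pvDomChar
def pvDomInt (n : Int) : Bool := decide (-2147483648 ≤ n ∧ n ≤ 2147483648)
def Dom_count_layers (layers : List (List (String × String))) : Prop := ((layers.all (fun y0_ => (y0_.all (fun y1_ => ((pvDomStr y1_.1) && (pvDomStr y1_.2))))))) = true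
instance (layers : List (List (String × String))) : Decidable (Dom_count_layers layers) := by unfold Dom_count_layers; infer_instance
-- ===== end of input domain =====

-- B replaces A's back-patching single pass with two forward passes (precomputed
-- last-occurrence indices, then a running counter); same O(n) cost, no mutation
-- of earlier output entries (objective: alternative decomposition).

-- ===== PORT A =====
-- layer.get("type") — shared reading of a layer's type (both Pythons write it inline)
def pvType (l : List (String × String)) : Option String := (PySem.Dict.mk l).get? "type"

-- A: one pass over range(len(layers)); dict maps type -> (index, count) with
-- default (None, 0); appends [count+1, True] and back-patches the previous
-- same-type entry's flag to False via its stored index (always a valid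
-- non-negative index, so pySetD/pyGetD there are exact).
def count_layers (layers : List (List (String × String))) : List (Int × Bool) :=
  let num_layers : Int := (layers.length : Int)
  (((PySem.List.pyRange 0 num_layers 1).foldl
      (fun (st : PySem.Dict (Option String) (Option Int × Int) × List (Int × Bool)) i =>
        let layer_type := pvType (PySem.List.pyGetD layers i [])
        let q := st.1.getD layer_type (none, 0)
        let layer_num := q.2 + 1
        let lc := st.2 ++ [(layer_num, true)]
        let lc2 := match q.1 with
          | none => lc
          | some j => PySem.List.pySetD lc j ((PySem.List.pyGetD lc j (0, true)).1, false)
        (st.1.insert layer_type (some i, layer_num), lc2))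
      (PySem.Dict.empty, []))).2

-- ===== PORT B =====
-- B: pass 1 builds last_index : type -> last position; pass 2 keeps a running
-- per-type counter and decides is_last by i == last_index[type].  The Python
-- lookup last_index[layer_type] always succeeds (the key was inserted in pass 1),
-- so the port's getD default -1 is never used.
def count_layers_alt (layers : List (List (String × String))) : List (Int × Bool) :=
  let last_index : PySem.Dict (Option String) Int :=
    (PySem.List.enumerate layers 0).foldl
      (fun d p => d.insert (pvType p.2) p.1) PySem.Dict.empty
  (((PySem.List.enumerate layers 0).foldl
      (fun (st : PySem.Dict (Option String) Int × List (Int × Bool)) p =>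
        let layer_type := pvType p.2
        let layer_num := st.1.getD layer_type 0 + 1
        (st.1.insert layer_type layer_num,
         st.2 ++ [(layer_num, decide (p.1 = last_index.getD layer_type (-1)))]))
      (PySem.Dict.empty, []))).2

-- ===== PRECONDITION & SPEC =====
def Spec_count_layers (layers : List (List (String × String))) (out : List (Int × Bool)) : Prop := out = count_layers_alt layers
instance (layers : List (List (String × String))) (out : List (Int × Bool)) : Decidable (Spec_count_layers layers out) := by unfold Spec_count_layers; infer_instance

-- ===== CLAIM (what is proved, stated in full; the proofs are below) =====
def Claim_equal_count_layers : Prop := ∀ (layers : List (List (String × String))), Dom_count_layers layers → Spec_count_layers layers (count_layers layers)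

-- ===== LEMMAS AND PROOFS =====

-- reference annotation: given the types already seen (pre0) and the types still
-- to come, produce the [count, is_last] rows for the remaining types
def pvAnno (pre0 : List (Option String)) : List (Option String) → List (Int × Bool)
  | [] => []
  | t :: rest => (((pre0.count t : Int) + 1), !(rest.contains t)) :: pvAnno (pre0 ++ [t]) rest

-- index of the last occurrence of t in l (none if absent)
def pvLast (t : Option String) : List (Option String) → Option Nat
  | [] => none
  | s :: rest =>
    match pvLast t rest with
    | some j => some (j + 1)
    | none => if s = t then some 0 else none

-- A's loop step / B's loop step, on (index, type) pairs
def pvStepA (st : PySem.Dict (Option String) (Option Int × Int) × List (Int × Bool))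
    (p : Int × Option String) :
    PySem.Dict (Option String) (Option Int × Int) × List (Int × Bool) :=
  let q := st.1.getD p.2 (none, 0)
  let layer_num := q.2 + 1
  let lc := st.2 ++ [(layer_num, true)]
  let lc2 := match q.1 with
    | none => lc
    | some j => PySem.List.pySetD lc j ((PySem.List.pyGetD lc j (0, true)).1, false)
  (st.1.insert p.2 (some p.1, layer_num), lc2)

def pvStepB (L : PySem.Dict (Option String) Int)
    (st : PySem.Dict (Option String) Int × List (Int × Bool)) (p : Int × Option String) :
    PySem.Dict (Option String) Int × List (Int × Bool) :=
  (st.1.insert p.2 (st.1.getD p.2 0 + 1),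
   st.2 ++ [(st.1.getD p.2 0 + 1, decide (p.1 = L.getD p.2 (-1)))])

theorem pvAnno_length (pre0 l) : (pvAnno pre0 l).length = l.length := by
  induction l generalizing pre0 with
  | nil => rfl
  | cons t rest ih => simp [pvAnno, ih]

theorem pvAnno_getElem? (pre0 l) (j : Nat) (h : j < l.length) :
    (pvAnno pre0 l)[j]? =
      some ((((pre0 ++ l.take j).count l[j] : Int) + 1), !((l.drop (j + 1)).contains l[j])) := by
  induction l generalizing pre0 j with
  | nil => simp at h
  | cons t rest ih =>
    cases j with
    | zero => simp [pvAnno]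
    | succ j =>
      simp only [List.length_cons, Nat.succ_lt_succ_iff] at h
      simp [pvAnno, ih (pre0 ++ [t]) j h]

theorem pvLast_eq_none_iff (t l) : pvLast t l = none ↔ t ∉ l := by
  induction l with
  | nil => simp [pvLast]
  | cons s rest ih =>
    simp only [pvLast, List.mem_cons]
    cases hr : pvLast t rest with
    | some j => simp [← ih, hr]
    | none =>
      rw [ih] at hr
      by_cases hs : s = t
      · simp [hs, hr]
      · simp only [if_neg hs]
        simp only [true_iff, not_or]
        exact ⟨fun h => hs h.symm, hr⟩

theorem pvLast_spec (t l j) (h : pvLast t l = some j) :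
    j < l.length ∧ l[j]? = some t ∧ ∀ k, j < k → l[k]? ≠ some t := by
  induction l generalizing j with
  | nil => simp [pvLast] at h
  | cons s rest ih =>
    simp only [pvLast] at h
    cases hr : pvLast t rest with
    | some j' =>
      rw [hr] at h
      obtain ⟨h1, h2, h3⟩ := ih j' hr
      cases h
      refine ⟨by simpa using h1, by simpa using h2, ?_⟩
      intro k hk
      cases k with
      | zero => omega
      | succ k => simpa using h3 k (by omega)
    | none =>
      rw [hr] at h
      rw [pvLast_eq_none_iff] at hr
      by_cases hs : s = t
      · simp only [if_pos hs] at h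
        cases h
        refine ⟨by simp, by simpa using hs, ?_⟩
        intro k hk
        cases k with
        | zero => omega
        | succ k =>
          simp only [List.getElem?_cons_succ]
          intro hc
          exact hr (by exact List.mem_of_getElem? hc)
      · simp [if_neg hs] at h
  
theorem pvLast_snoc (t l s) :
    pvLast t (l ++ [s]) = if s = t then some l.length else pvLast t l := by
  induction l with
  | nil => by_cases hs : s = t <;> simp [pvLast, hs]
  | cons a rest ih =>
    simp only [List.cons_append, pvLast, ih]
    by_cases hs : s = t
    · simp [hs]
    · simp only [if_neg hs]

-- A's patch step: appending the fresh row and clearing the flag at the stored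
-- last index is exactly the annotation of pre ++ [t]
theorem pvAnno_snoc (pre : List (Option String)) (t : Option String) :
    pvAnno [] (pre ++ [t]) =
      (match pvLast t pre with
        | none => pvAnno [] pre ++ [(((pre.count t : Int) + 1), true)]
        | some j =>
          PySem.List.pySetD (pvAnno [] pre ++ [(((pre.count t : Int) + 1), true)]) (j : Int)
            ((PySem.List.pyGetD (pvAnno [] pre ++ [(((pre.count t : Int) + 1), true)]) (j : Int) (0, true)).1,
              false)) := by
  cases hl : pvLast t pre with
  | none =>
    rw [pvLast_eq_none_iff] at hl
    refine List.ext_getElem? fun k => ?_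
    by_cases hk : k < pre.length + 1
    · rw [pvAnno_getElem? _ _ k (by simpa using hk)]
      by_cases hk' : k < pre.length
      · rw [List.getElem?_append_left (by rwa [pvAnno_length]),
          pvAnno_getElem? _ _ k hk']
        have hne : pre[k] ≠ t := fun he => hl (he ▸ pre.getElem_mem hk')
        have htake : (pre ++ [t]).take k = pre.take k :=
          List.take_append_of_le_length (by omega)
        have hdrop : (pre ++ [t]).drop (k + 1) = pre.drop (k + 1) ++ [t] :=
          List.drop_append_of_le_length (by omega)
        simp [List.getElem_append_left hk', htake, hdrop, hne]
      · have hk0 : k = pre.length := by omega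
        subst hk0
        rw [List.getElem?_append_right (by rw [pvAnno_length]), pvAnno_length]
        simp
    · rw [List.getElem?_eq_none (by simpa [pvAnno_length] using hk),
        List.getElem?_eq_none (by simp [pvAnno_length]; omega)]
  | some j =>
    obtain ⟨hj1, hj2, hj3⟩ := pvLast_spec t pre j hl
    simp only [PySem.List.pySetD_natCast, PySem.List.pyGetD_natCast]
    refine List.ext_getElem? fun k => ?_
    by_cases hk : k < pre.length + 1
    · rw [pvAnno_getElem? _ _ k (by simpa using hk)]
      rw [List.getElem?_set]
      by_cases hjk : j = k
      · subst hjk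
        have hget : pre[j] = t := by
          have := hj2; rwa [List.getElem?_eq_getElem hj1, Option.some_inj] at this
        rw [if_pos rfl, if_pos (by simp [pvAnno_length]; omega)]
        rw [List.getD_eq_getElem?_getD, List.getElem?_append_left (by rwa [pvAnno_length]),
          pvAnno_getElem? _ _ j hj1]
        have htake : (pre ++ [t]).take j = pre.take j :=
          List.take_append_of_le_length (le_of_lt hj1)
        have hdrop : (pre ++ [t]).drop (j + 1) = pre.drop (j + 1) ++ [t] :=
          List.drop_append_of_le_length (by omega)
        simp [List.getElem_append_left hj1, hget, htake, hdrop]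
      · rw [if_neg hjk]
        by_cases hk' : k < pre.length
        · rw [List.getElem?_append_left (by rwa [pvAnno_length]),
            pvAnno_getElem? _ _ k hk']
          have hkt : (pre[k] ∈ (pre ++ [t]).drop (k + 1)) ↔ pre[k] ∈ pre.drop (k + 1) := by
            rw [List.drop_append_of_le_length (show k + 1 ≤ pre.length by omega)]
            simp only [List.mem_append, List.mem_singleton]
            by_cases hptk : pre[k] = t
            · -- pre[k] = t and k ≠ j: k < j (j is the last), so t occurs in pre.drop (k+1)
              have hkj : k < j := by
                rcases Nat.lt_or_ge j k with hjk' | hjk'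
                · exact absurd (hj3 k hjk') (by simp [List.getElem?_eq_getElem hk', hptk])
                · omega
              have hmem : t ∈ pre.drop (k + 1) := by
                have hgj : pre[j] = t := by
                  have := hj2; rwa [List.getElem?_eq_getElem hj1, Option.some_inj] at this
                rw [← hgj]
                have hjlen : j - (k + 1) < (pre.drop (k + 1)).length := by
                  rw [List.length_drop]; omega
                have hge : (pre.drop (k + 1))[j - (k + 1)] = pre[j] := by
                  rw [List.getElem_drop]; congr 1; omega
                rw [← hge]
                exact List.getElem_mem hjlen
              simp [hptk, hmem]
            · simp [hptk]
          have htake : (pre ++ [t]).take k = pre.take k :=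
            List.take_append_of_le_length (by omega)
          simp [List.getElem_append_left hk', htake, hkt]
        · have hk0 : k = pre.length := by omega
          subst hk0
          rw [List.getElem?_append_right (by rw [pvAnno_length]), pvAnno_length]
          simp
    · rw [List.getElem?_eq_none (by simpa [pvAnno_length] using hk),
        List.getElem?_eq_none (by simp [pvAnno_length]; omega)]

-- fold over enumerate of a mapped list = fold over enumerate reading through the map
theorem pvEnumerate_map_foldl {α β σ : Type} (g : α → β) (F' : σ → Int × α → σ)
    (F : σ → Int × β → σ) (hF : ∀ st (i : Int) (x : α), F' st (i, x) = F st (i, g x)) :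
    ∀ (l : List α) (s : Int) (init : σ),
      (PySem.List.enumerate l s).foldl F' init
        = (PySem.List.enumerate (l.map g) s).foldl F init := by
  intro l
  induction l with
  | nil => intro s init; rfl
  | cons a rest ih =>
    intro s init
    simp only [List.map_cons, PySem.List.enumerate_cons, List.foldl_cons, hF]
    exact ih (s + 1) (F init (s, g a))

-- the pvLast of an appended list
theorem pvLast_append (t : Option String) (xs ys : List (Option String)) :
    pvLast t (xs ++ ys) = match pvLast t ys with
      | some j => some (xs.length + j)
      | none => pvLast t xs := by
  induction xs with
  | nil => cases hy : pvLast t ys <;> simp [hy, pvLast]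
  | cons a rest ih =>
    simp only [List.cons_append, pvLast, ih]
    cases pvLast t ys with
    | some j => simp [Nat.add_right_comm]
    | none => cases pvLast t rest <;> simp

-- B's first pass: the dict of last indices
theorem pvLastDict_getD (ts : List (Option String)) :
    ∀ (s : Int) (d : PySem.Dict (Option String) Int) (t : Option String) (v : Int),
      ((PySem.List.enumerate ts s).foldl (fun d p => d.insert p.2 p.1) d).getD t v
        = match pvLast t ts with
          | some j => s + (j : Int)
          | none => d.getD t v := by
  induction ts with
  | nil => intro s d t v; rfl
  | cons a rest ih =>
    intro s d t v
    simp only [PySem.List.enumerate_cons, List.foldl_cons, ih, pvLast]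
    cases hr : pvLast t rest with
    | some j => simp; ring
    | none =>
      by_cases ht : a = t
      · simp [ht]
      · simp [PySem.Dict.getD_insert, Ne.symm ht]
        rw [if_neg ht]

-- B's second pass produces the annotation
theorem pvB_loop (L : PySem.Dict (Option String) Int) :
    ∀ (rest pre : List (Option String)) (d : PySem.Dict (Option String) Int)
      (acc : List (Int × Bool)),
      (∀ t, d.getD t 0 = (pre.count t : Int)) →
      (∀ t v, L.getD t v = match pvLast t (pre ++ rest) with
        | some j => (j : Int)
        | none => v) →
      ((PySem.List.enumerate rest (pre.length : Int)).foldl (pvStepB L) (d, acc)).2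
        = acc ++ pvAnno pre rest := by
  intro rest
  induction rest with
  | nil => intro pre d acc hd hL; simp [pvAnno]
  | cons t rest' ih =>
    intro pre d acc hd hL
    simp only [PySem.List.enumerate_cons, List.foldl_cons]
    have hflag : decide ((pre.length : Int) = L.getD t (-1)) = !(rest'.contains t) := by
      rw [hL t (-1)]
      cases hr : pvLast t rest' with
      | none =>
        have ht : pvLast t (pre ++ t :: rest') = some pre.length := by
          rw [pvLast_append]
          simp [pvLast, hr]
        rw [ht]
        rw [pvLast_eq_none_iff] at hr
        simp [hr]
      | some j =>
        have ht : pvLast t (pre ++ t :: rest') = some (pre.length + (j + 1)) := by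
          rw [pvLast_append]
          simp [pvLast, hr]
        rw [ht]
        have hmem : t ∈ rest' := by
          by_contra hc
          rw [← pvLast_eq_none_iff] at hc
          simp [hc] at hr
        have hcont : rest'.contains t = true := by simp [hmem]
        rw [hcont]
        simp only [Bool.not_true, decide_eq_false_iff_not]
        intro hcontra
        have hcontra' : (pre.length : Int) = (pre.length : Int) + ((j : Int) + 1) := by
          exact_mod_cast hcontra
        omega
    have step2 : pvStepB L (d, acc) ((pre.length : Int), t)
        = (d.insert t ((pre.count t : Int) + 1),
           acc ++ [((pre.count t : Int) + 1, !(rest'.contains t))]) := by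
      unfold pvStepB
      rw [hd t, hflag]
    rw [step2]
    have hlen : (pre.length : Int) + 1 = ((pre ++ [t]).length : Int) := by simp
    rw [hlen,
      ih (pre ++ [t]) (d.insert t ((pre.count t : Int) + 1))
        (acc ++ [((pre.count t : Int) + 1, !(rest'.contains t))]) ?_ ?_]
    · simp [pvAnno]
    · intro t'
      rw [PySem.Dict.getD_insert]
      by_cases ht' : t' = t
      · subst ht'; simp [List.count_append]
      · rw [if_neg ht', hd t']
        have hc : (pre ++ [t]).count t' = pre.count t' := by
          rw [List.count_append]
          simp [Ne.symm ht']
        rw [hc]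
    · intro t' v
      rw [hL t' v]
      have hass : pre ++ t :: rest' = (pre ++ [t]) ++ rest' := by simp
      rw [hass]

-- A's loop produces the annotation
theorem pvA_loop :
    ∀ (rest pre : List (Option String)) (d : PySem.Dict (Option String) (Option Int × Int)),
      (∀ t, d.getD t (none, 0)
        = ((match pvLast t pre with
            | none => none
            | some j => some ((j : Nat) : Int)), (pre.count t : Int))) →
      ((PySem.List.enumerate rest (pre.length : Int)).foldl pvStepA (d, pvAnno [] pre)).2
        = pvAnno [] (pre ++ rest) := by
  intro rest
  induction rest with
  | nil => intro pre d hd; simp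
  | cons t rest' ih =>
    intro pre d hd
    simp only [PySem.List.enumerate_cons, List.foldl_cons]
    have hsnoc := pvAnno_snoc pre t
    have hstep : pvStepA (d, pvAnno [] pre) ((pre.length : Int), t)
        = (d.insert t (some (pre.length : Int), (pre.count t : Int) + 1),
           pvAnno [] (pre ++ [t])) := by
      unfold pvStepA
      rw [hd t]
      cases hpl : pvLast t pre with
      | none =>
        rw [hpl] at hsnoc
        rw [hsnoc]
      | some j =>
        rw [hpl] at hsnoc
        rw [hsnoc]
    rw [hstep]
    have hlen : (pre.length : Int) + 1 = ((pre ++ [t]).length : Int) := by simp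
    rw [hlen, ih (pre ++ [t]) (d.insert t (some (pre.length : Int), (pre.count t : Int) + 1)) ?_]
    · simp
    · intro t'
      rw [PySem.Dict.getD_insert]
      by_cases ht' : t' = t
      · subst ht'
        rw [if_pos rfl, pvLast_snoc, if_pos rfl]
        simp [List.count_append]
      · rw [if_neg ht', hd t', pvLast_snoc, if_neg (fun h => ht' h.symm)]
        have hc : (pre ++ [t]).count t' = pre.count t' := by
          rw [List.count_append]
          simp [Ne.symm ht']
        rw [hc]

theorem count_layers_eq_anno (layers : List (List (String × String))) :
    count_layers layers = pvAnno [] (layers.map pvType) := by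
  have h1 : (PySem.List.pyRange 0 (layers.length : Int) 1).foldl
        (fun (st : PySem.Dict (Option String) (Option Int × Int) × List (Int × Bool)) i =>
          let layer_type := pvType (PySem.List.pyGetD layers i [])
          let q := st.1.getD layer_type (none, 0)
          let layer_num := q.2 + 1
          let lc := st.2 ++ [(layer_num, true)]
          let lc2 := match q.1 with
            | none => lc
            | some j => PySem.List.pySetD lc j ((PySem.List.pyGetD lc j (0, true)).1, false)
          (st.1.insert layer_type (some i, layer_num), lc2))
        (PySem.Dict.empty, ([] : List (Int × Bool)))
      = (PySem.List.enumerate (layers.map pvType) 0).foldl pvStepA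
          (PySem.Dict.empty, ([] : List (Int × Bool))) := by
    rw [← pvEnumerate_map_foldl pvType
        (fun st p => pvStepA st (p.1, pvType p.2)) pvStepA (fun _ _ _ => rfl) layers 0]
    rw [PySem.List.enumerate_eq_map_pyRange layers [], List.foldl_map]
    rfl
  have h2 := pvA_loop (layers.map pvType) [] PySem.Dict.empty
    (by intro t; simp [PySem.Dict.getD_empty, pvLast])
  simp only [List.nil_append, List.length_nil, Nat.cast_zero] at h2
  show ((PySem.List.pyRange 0 (layers.length : Int) 1).foldl _ (PySem.Dict.empty, [])).2
      = pvAnno [] (layers.map pvType)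
  rw [h1]
  exact h2

theorem count_layers_alt_eq_anno (layers : List (List (String × String))) :
    count_layers_alt layers = pvAnno [] (layers.map pvType) := by
  have hLdict : (PySem.List.enumerate layers 0).foldl
        (fun d p => d.insert (pvType p.2) p.1) PySem.Dict.empty
      = (PySem.List.enumerate (layers.map pvType) 0).foldl
          (fun d p => d.insert p.2 p.1) PySem.Dict.empty :=
    pvEnumerate_map_foldl pvType _ _ (fun _ _ _ => rfl) layers 0 _
  have hL : ∀ t v, ((PySem.List.enumerate layers 0).foldl
        (fun d p => d.insert (pvType p.2) p.1) PySem.Dict.empty).getD t v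
      = match pvLast t (layers.map pvType) with
        | some j => (j : Int)
        | none => v := by
    intro t v
    rw [hLdict, pvLastDict_getD (layers.map pvType) 0 PySem.Dict.empty t v]
    cases pvLast t (layers.map pvType) <;> simp
  set L := (PySem.List.enumerate layers 0).foldl
      (fun d p => d.insert (pvType p.2) p.1) PySem.Dict.empty with hLdef
  have h1 : (PySem.List.enumerate layers 0).foldl
        (fun (st : PySem.Dict (Option String) Int × List (Int × Bool)) p =>
          let layer_type := pvType p.2
          let layer_num := st.1.getD layer_type 0 + 1
          (st.1.insert layer_type layer_num,
           st.2 ++ [(layer_num, decide (p.1 = L.getD layer_type (-1)))]))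
        (PySem.Dict.empty, ([] : List (Int × Bool)))
      = (PySem.List.enumerate (layers.map pvType) 0).foldl (pvStepB L)
          (PySem.Dict.empty, ([] : List (Int × Bool))) :=
    pvEnumerate_map_foldl pvType _ _ (fun _ _ _ => rfl) layers 0 _
  have h2 := pvB_loop L (layers.map pvType) [] PySem.Dict.empty []
    (by intro t; simp [PySem.Dict.getD_empty])
    (by intro t v; simp only [List.nil_append]; exact hL t v)
  simp only [List.nil_append, List.length_nil, Nat.cast_zero] at h2
  show ((PySem.List.enumerate layers 0).foldl _ (PySem.Dict.empty, [])).2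
      = pvAnno [] (layers.map pvType)
  rw [h1]
  exact h2

-- ===== VERDICT (by name: the statement is the Claim_ definition above) =====
theorem count_layers_spec : Claim_equal_count_layers := by
  intro layers _
  unfold Spec_count_layers
  rw [count_layers_eq_anno, count_layers_alt_eq_anno]
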